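-- pv_equiv track=rewrite | github.com/imperiousnery/mathpython | 20230830_midiutil.MidiFile_calculus.py | generate_fractal_pattern
-- ===== SOURCE A (Python) =====
-- def generate_fractal_pattern(initial_notes, iterations):
--     pattern = initial_notes
--
--     for _ in range(iterations):
--         new_pattern = []
--         for note in pattern:
--             new_pattern.extend([note - 1, note + 1])
--         pattern = new_pattern
--
--     return pattern
-- ===== SOURCE B (Python) =====
-- def generate_fractal_pattern(initial_notes, iterations):
--     # Closed form: leaf i of the expansion tree for a note has value
--     # note + (#ones in i) - (#zeros in i) = note + 2*popcount(i) - iterations.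
--     if iterations <= 0:
--         return initial_notes
--     return [note + 2 * bin(i).count('1') - iterations
--             for note in initial_notes
--             for i in range(2 ** iterations)]
-- ===== Notes on version B (the rewrite author's own statement) =====
-- stated objective: alternative
-- what changed: Replaces the iterated list-doubling passes by a single comprehension computing each output element directly from its index via popcount (leaf i gets note + 2*popcount(i) - iterations).
import Mathlib
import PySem

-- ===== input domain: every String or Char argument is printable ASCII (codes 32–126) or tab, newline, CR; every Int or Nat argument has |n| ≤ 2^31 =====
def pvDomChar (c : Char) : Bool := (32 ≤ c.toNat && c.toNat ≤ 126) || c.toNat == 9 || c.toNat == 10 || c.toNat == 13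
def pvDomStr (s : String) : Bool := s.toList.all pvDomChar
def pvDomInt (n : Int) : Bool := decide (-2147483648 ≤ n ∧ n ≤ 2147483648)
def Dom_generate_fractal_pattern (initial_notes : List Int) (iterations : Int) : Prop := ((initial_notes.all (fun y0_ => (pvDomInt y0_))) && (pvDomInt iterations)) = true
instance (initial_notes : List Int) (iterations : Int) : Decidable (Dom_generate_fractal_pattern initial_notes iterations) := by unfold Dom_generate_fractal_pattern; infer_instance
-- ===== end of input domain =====

-- B replaces A's iterated list-doubling passes by one closed-form pass computing each
-- element from its index via popcount; an alternative algorithm of the same total cost.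


-- ===== PORT A =====
def generate_fractal_pattern (initial_notes : List Int) (iterations : Int) : List Int :=
  (PySem.List.pyRange 0 iterations 1).foldl
    (fun pattern _ =>
      pattern.foldl (fun new_pattern note => new_pattern ++ [note - 1, note + 1]) [])
    initial_notes

-- ===== PORT B =====
-- popcount of a natural number: Python's bin(i).count('1')
def pvPopcount : Nat → Nat
  | 0 => 0
  | n+1 => pvPopcount ((n+1)/2) + (n+1) % 2
decreasing_by exact Nat.div_lt_self (Nat.succ_pos n) (by omega)

def generate_fractal_pattern_alt (initial_notes : List Int) (iterations : Int) : List Int :=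
  if iterations ≤ 0 then initial_notes
  else
    initial_notes.flatMap (fun note =>
      (List.range (2 ^ iterations.toNat)).map
        (fun i => note + 2 * (pvPopcount i : Int) - iterations))

-- ===== PRECONDITION & SPEC =====
def Spec_generate_fractal_pattern (initial_notes : List Int) (iterations : Int) (out : List Int) : Prop := out = generate_fractal_pattern_alt initial_notes iterations
instance (initial_notes : List Int) (iterations : Int) (out : List Int) : Decidable (Spec_generate_fractal_pattern initial_notes iterations out) := by unfold Spec_generate_fractal_pattern; infer_instance

-- ===== CLAIM (what is proved, stated in full; the proofs are below) =====
def Claim_equal_generate_fractal_pattern : Prop := ∀ (initial_notes : List Int) (iterations : Int), Dom_generate_fractal_pattern initial_notes iterations → Spec_generate_fractal_pattern initial_notes iterations (generate_fractal_pattern initial_notes iterations)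

-- ===== LEMMAS AND PROOFS =====

-- A's inner loop is flatMap (fun v => [v-1, v+1])
theorem pvStep_eq (p acc : List Int) :
    p.foldl (fun new_pattern note => new_pattern ++ [note - 1, note + 1]) acc
      = acc ++ p.flatMap (fun v => [v - 1, v + 1]) := by
  induction p generalizing acc with
  | nil => simp
  | cons h t ih => simp [List.foldl, ih, List.flatMap_cons]

theorem pvPopcount_two_mul (j : Nat) : pvPopcount (2 * j) = pvPopcount j := by
  cases j with
  | zero => rfl
  | succ m =>
    have h : 2 * (m + 1) = (2 * m + 1) + 1 := by omega
    rw [h, pvPopcount]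
    have h2 : (2 * m + 1 + 1) / 2 = m + 1 := by omega
    have h3 : (2 * m + 1 + 1) % 2 = 0 := by omega
    rw [h2, h3]
    omega

theorem pvPopcount_two_mul_add_one (j : Nat) : pvPopcount (2 * j + 1) = pvPopcount j + 1 := by
  rw [pvPopcount]
  have h2 : (2 * j + 1) / 2 = j := by omega
  have h3 : (2 * j + 1) % 2 = 1 := by omega
  rw [h2, h3]

theorem pvRangeDouble (m : Nat) (f : Nat → Int) :
    (List.range (2 * m)).map f
      = (List.range m).flatMap (fun j => [f (2 * j), f (2 * j + 1)]) := by
  induction m with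
  | zero => simp
  | succ k ih =>
    have h : 2 * (k + 1) = (2 * k + 1) + 1 := by omega
    rw [h, List.range_succ, List.range_succ, List.range_succ]
    simp [ih, List.flatMap_append]

-- After n doubling passes, leaf i of each note has value note + 2*popcount(i) - n.
theorem pvKey (n : Nat) (xs : List Int) :
    (fun p : List Int => p.flatMap (fun v => [v - 1, v + 1]))^[n] xs
      = xs.flatMap (fun note =>
          (List.range (2 ^ n)).map (fun i => note + 2 * (pvPopcount i : Int) - n)) := by
  induction n generalizing xs with
  | zero =>
    simp [pvPopcount]
  | succ k ih =>
    rw [Function.iterate_succ_apply', ih]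
    simp only [List.flatMap_assoc]
    congr 1
    funext note
    rw [show (2 : Nat) ^ (k + 1) = 2 * 2 ^ k by ring, pvRangeDouble, List.flatMap_map]
    congr 1
    funext j
    simp only [pvPopcount_two_mul, pvPopcount_two_mul_add_one]
    push_cast
    simp only [List.cons.injEq, and_true]
    exact ⟨by ring, by ring⟩

theorem pvFoldlConstIter {α β : Type} (l : List α) (f : β → β) (x : β) :
    l.foldl (fun p _ => f p) x = f^[l.length] x := by
  induction l generalizing x with
  | nil => rfl
  | cons h t ih => simp [List.foldl, ih, Function.iterate_succ_apply]

-- ===== VERDICT (by name: the statement is the Claim_ definition above) =====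
theorem generate_fractal_pattern_spec : Claim_equal_generate_fractal_pattern := by
  intro xs it _
  unfold Spec_generate_fractal_pattern generate_fractal_pattern generate_fractal_pattern_alt
  by_cases h : it ≤ 0
  · rw [PySem.List.pyRange_one_eq_nil (by omega)]
    simp [h]
  · have hpos : 0 < it := by omega
    have hlen : (PySem.List.pyRange 0 it 1).length = it.toNat := by
      rw [PySem.List.length_pyRange_one]; omega
    simp only [if_neg h]
    have hstep : ∀ (p : List Int),
        p.foldl (fun new_pattern note => new_pattern ++ [note - 1, note + 1]) []
          = p.flatMap (fun v => [v - 1, v + 1]) := by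
      intro p; rw [pvStep_eq]; simp
    calc (PySem.List.pyRange 0 it 1).foldl
            (fun pattern _ =>
              pattern.foldl (fun new_pattern note => new_pattern ++ [note - 1, note + 1]) []) xs
        = (PySem.List.pyRange 0 it 1).foldl
            (fun pattern _ => pattern.flatMap (fun v => [v - 1, v + 1])) xs := by
          congr 1; funext p _; exact hstep p
      _ = (fun p : List Int => p.flatMap (fun v => [v - 1, v + 1]))^[it.toNat] xs := by
          rw [pvFoldlConstIter, hlen]
      _ = xs.flatMap (fun note =>
            (List.range (2 ^ it.toNat)).map
              (fun i => note + 2 * (pvPopcount i : Int) - it.toNat)) := pvKey it.toNat xs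
      _ = xs.flatMap (fun note =>
            (List.range (2 ^ it.toNat)).map
              (fun i => note + 2 * (pvPopcount i : Int) - it)) := by
          rw [Int.toNat_of_nonneg (by omega)]
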